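-- pv_equiv track=rewrite | github.com/jmcguigan10/stoked-semantic | src/stoked_semantic/data.py | _query_pair_signature
-- ===== SOURCE A (Python) =====
-- from itertools import combinations, permutations
--
-- BALANCED_TRIPLET_POSITIVE_TRIPLES: tuple[tuple[int, int, int], ...] = (
--     (0, 1, 2),
--     (0, 1, 3),
--     (0, 2, 4),
--     (0, 3, 5),
--     (0, 4, 5),
--     (1, 2, 5),
--     (1, 3, 4),
--     (1, 4, 5),
--     (2, 3, 4),
--     (2, 3, 5),
-- )
--
-- def _query_pair_signature(
--
--     query_nodes: tuple[int, int, int],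
--     clause_subset: tuple[int, ...],
-- ) -> tuple[int, int, int]:
--     pair_counts: list[int] = []
--     for left_index, right_index in combinations(sorted(query_nodes), 2):
--         count = 0
--         for clause_index in clause_subset:
--             triple = BALANCED_TRIPLET_POSITIVE_TRIPLES[clause_index]
--             if left_index in triple and right_index in triple:
--                 count += 1
--         pair_counts.append(count)
--     return tuple(pair_counts)
-- ===== SOURCE B (Python) =====
-- BALANCED_TRIPLET_POSITIVE_TRIPLES: tuple[tuple[int, int, int], ...] = (
--     (0, 1, 2),
--     (0, 1, 3),
--     (0, 2, 4),
--     (0, 3, 5),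
--     (0, 4, 5),
--     (1, 2, 5),
--     (1, 3, 4),
--     (1, 4, 5),
--     (2, 3, 4),
--     (2, 3, 5),
-- )
--
-- def _query_pair_signature(
--     query_nodes: tuple[int, int, int],
--     clause_subset: tuple[int, ...],
-- ) -> tuple[int, int, int]:
--     # One pass over clause_subset with three counters instead of the
--     # pairs-outer / clauses-inner nested loops: each triple is fetched and
--     # tested for membership once per clause.
--     a, b, c = sorted(query_nodes)
--     n_ab = n_ac = n_bc = 0
--     for clause_index in clause_subset:
--         triple = BALANCED_TRIPLET_POSITIVE_TRIPLES[clause_index]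
--         in_a = a in triple
--         in_b = b in triple
--         in_c = c in triple
--         if in_a and in_b:
--             n_ab += 1
--         if in_a and in_c:
--             n_ac += 1
--         if in_b and in_c:
--             n_bc += 1
--     return (n_ab, n_ac, n_bc)
-- ===== Notes on version B (the rewrite author's own statement) =====
-- stated objective: alternative
-- what changed: Replaces the pairs-outer nested loops (3 scans of clause_subset, 6 membership tests per clause) by a single pass over clause_subset that fetches and membership-tests each triple once and maintains three counters.
import Mathlib
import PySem

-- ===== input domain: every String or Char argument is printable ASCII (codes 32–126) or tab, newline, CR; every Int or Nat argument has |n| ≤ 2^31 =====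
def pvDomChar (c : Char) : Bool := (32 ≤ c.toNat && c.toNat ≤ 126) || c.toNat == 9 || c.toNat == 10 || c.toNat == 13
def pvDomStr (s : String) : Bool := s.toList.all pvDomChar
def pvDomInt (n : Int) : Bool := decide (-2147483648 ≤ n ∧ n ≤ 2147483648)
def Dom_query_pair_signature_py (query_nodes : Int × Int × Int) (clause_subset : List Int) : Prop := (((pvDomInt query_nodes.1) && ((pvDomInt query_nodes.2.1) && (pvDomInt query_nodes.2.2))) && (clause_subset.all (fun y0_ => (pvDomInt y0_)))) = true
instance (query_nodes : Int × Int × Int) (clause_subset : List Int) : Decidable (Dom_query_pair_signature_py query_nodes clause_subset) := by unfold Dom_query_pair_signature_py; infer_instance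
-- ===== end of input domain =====

-- B replaces A's pairs-outer nested loops by a single pass over clause_subset
-- maintaining three counters (alternative decomposition, same result).

-- BALANCED_TRIPLET_POSITIVE_TRIPLES (module constant used by both versions)
def pvTriples : List (Int × Int × Int) :=
  [(0, 1, 2), (0, 1, 3), (0, 2, 4), (0, 3, 5), (0, 4, 5),
   (1, 2, 5), (1, 3, 4), (1, 4, 5), (2, 3, 4), (2, 3, 5)]

-- 'v in triple' for a 3-tuple (both Pythons use this membership test)
def pvInTriple (v : Int) (t : Int × Int × Int) : Bool :=
  v == t.1 || v == t.2.1 || v == t.2.2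

-- ===== PORT A =====
-- combinations(xs, 2) as in itertools, for a list
def pvCombos2 : List Int → List (Int × Int)
  | [] => []
  | x :: xs => xs.map (fun y => (x, y)) ++ pvCombos2 xs

-- body of A's inner loop (an out-of-range clause index raises IndexError in
-- Python: excluded by Pre_; the none branch is never reached under Pre_)
def pvStepA (l r : Int) (count ci : Int) : Int :=
  match PySem.List.pyGet? pvTriples ci with
  | some t => if pvInTriple l t && pvInTriple r t then count + 1 else count
  | none => count

-- inner loop of A for one pair: count clauses whose triple contains both ends
def pvPairCount (l r : Int) (clause_subset : List Int) : Int :=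
  clause_subset.foldl (pvStepA l r) 0

def query_pair_signature_py (query_nodes : Int × Int × Int) (clause_subset : List Int) : Int × Int × Int :=
  let s := PySem.List.sorted [query_nodes.1, query_nodes.2.1, query_nodes.2.2] (fun x => x) false
  let pair_counts := (pvCombos2 s).map (fun p => pvPairCount p.1 p.2 clause_subset)
  -- tuple(pair_counts): pair_counts always has exactly 3 entries here
  (PySem.List.pyGetD pair_counts 0 0, PySem.List.pyGetD pair_counts 1 0,
   PySem.List.pyGetD pair_counts 2 0)

-- ===== PORT B =====
-- body of B's single loop: fetch the triple once, test the three memberships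
-- once, bump the three counters (none = IndexError, excluded by Pre_)
def pvStepB (a b c : Int) (acc : Int × Int × Int) (ci : Int) : Int × Int × Int :=
  match PySem.List.pyGet? pvTriples ci with
  | some t =>
      let in_a := pvInTriple a t
      let in_b := pvInTriple b t
      let in_c := pvInTriple c t
      let n_ab := if in_a && in_b then acc.1 + 1 else acc.1
      let n_ac := if in_a && in_c then acc.2.1 + 1 else acc.2.1
      let n_bc := if in_b && in_c then acc.2.2 + 1 else acc.2.2
      (n_ab, n_ac, n_bc)
  | none => acc

def query_pair_signature_py_alt (query_nodes : Int × Int × Int) (clause_subset : List Int) : Int × Int × Int :=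
  match PySem.List.sorted [query_nodes.1, query_nodes.2.1, query_nodes.2.2] (fun x => x) false with
  | a :: b :: c :: _ => clause_subset.foldl (pvStepB a b c) (0, 0, 0)
  | _ => (0, 0, 0)   -- unreachable: sorted list of 3 has 3 elements

-- ===== PRECONDITION & SPEC =====
-- Pre_ excludes exactly the inputs on which Python A raises IndexError:
-- a clause index outside range(-10, 10) of the 10-entry triple table.
def Pre_query_pair_signature_py (query_nodes : Int × Int × Int) (clause_subset : List Int) : Prop :=
  ∀ ci ∈ clause_subset, -10 ≤ ci ∧ ci < 10
instance (query_nodes : Int × Int × Int) (clause_subset : List Int) : Decidable (Pre_query_pair_signature_py query_nodes clause_subset) := by unfold Pre_query_pair_signature_py; infer_instance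

def pvWitness_query_pair_signature_py : (Int × Int × Int) × List Int := ((2, 0, 1), [0, 5, -1, 3])

def Spec_query_pair_signature_py (query_nodes : Int × Int × Int) (clause_subset : List Int) (out : Int × Int × Int) : Prop := out = query_pair_signature_py_alt query_nodes clause_subset
instance (query_nodes : Int × Int × Int) (clause_subset : List Int) (out : Int × Int × Int) : Decidable (Spec_query_pair_signature_py query_nodes clause_subset out) := by unfold Spec_query_pair_signature_py; infer_instance

-- ===== CLAIM (what is proved, stated in full; the proofs are below) =====
def Claim_equal_query_pair_signature_py : Prop := ∀ (query_nodes : Int × Int × Int) (clause_subset : List Int), Dom_query_pair_signature_py query_nodes clause_subset → Pre_query_pair_signature_py query_nodes clause_subset → Spec_query_pair_signature_py query_nodes clause_subset (query_pair_signature_py query_nodes clause_subset)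

-- ===== LEMMAS AND PROOFS =====

lemma pvStepA_shift (l r n ci : Int) : pvStepA l r n ci = n + pvStepA l r 0 ci := by
  unfold pvStepA
  cases h : PySem.List.pyGet? pvTriples ci <;> simp <;> split_ifs <;> omega

lemma pvPairCount_cons (l r ci : Int) (cs : List Int) :
    pvPairCount l r (ci :: cs) = pvStepA l r 0 ci + pvPairCount l r cs := by
  have shift : ∀ (cs : List Int) (n : Int),
      cs.foldl (pvStepA l r) n = n + cs.foldl (pvStepA l r) 0 := by
    intro cs
    induction cs with
    | nil => simp
    | cons d ds ih =>
        intro n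
        simp only [List.foldl_cons]
        rw [ih, ih (pvStepA l r 0 d), pvStepA_shift]
        ring
  simp only [pvPairCount, List.foldl_cons]
  rw [shift]

-- B's single pass computes the three pair counts of A at once
lemma pvLoop_eq (a b c : Int) (cs : List Int) : ∀ acc : Int × Int × Int,
    cs.foldl (pvStepB a b c) acc
    = (acc.1 + pvPairCount a b cs, acc.2.1 + pvPairCount a c cs, acc.2.2 + pvPairCount b c cs) := by
  induction cs with
  | nil => intro acc; simp [pvPairCount]
  | cons ci cs ih =>
      intro acc
      simp only [List.foldl_cons]
      rw [ih, pvPairCount_cons, pvPairCount_cons, pvPairCount_cons]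
      simp only [pvStepB, pvStepA]
      cases h : PySem.List.pyGet? pvTriples ci with
      | none => simp
      | some t => simp only []; split_ifs <;> simp [Prod.ext_iff] <;> omega

-- the sorted list of three elements has exactly three elements
lemma pvSorted3 (p q r : Int) :
    ∃ a b c, PySem.List.sorted [p, q, r] (fun x => x) false = [a, b, c] := by
  have h := PySem.List.length_sorted (xs := [p, q, r]) (key := fun x : Int => x) (rev := false)
  match hs : PySem.List.sorted [p, q, r] (fun x : Int => x) false with
  | [a, b, c] => exact ⟨a, b, c, rfl⟩
  | [] | [_] | [_, _] | _ :: _ :: _ :: _ :: _ => rw [hs] at h; simp at h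

-- ===== VERDICT (by name: the statement is the Claim_ definition above) =====
theorem query_pair_signature_py_spec : Claim_equal_query_pair_signature_py := by
  intro q cs _ _
  unfold Spec_query_pair_signature_py query_pair_signature_py query_pair_signature_py_alt
  obtain ⟨a, b, c, hs⟩ := pvSorted3 q.1 q.2.1 q.2.2
  rw [hs]
  simp only [pvCombos2, List.map_cons, List.map_nil, List.append_nil,
    List.cons_append, List.nil_append]
  rw [pvLoop_eq]
  simp [PySem.List.pyGetD, PySem.List.pyGet?, PySem.List.pyIdx?]
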